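-- pv_equiv track=rewrite | github.com/paulgazz/kmax | scripts/krepair_evaluation/assets/common.py | get_line_mappings
-- ===== SOURCE A (Python) =====
-- def get_line_mappings(added_lines, removed_lines, old_line_count, new_line_count):
--   """Returns new2old and old2new mappings.
--
--   Value of -1 means there is no mapping on the other end, e.g., line is removed or added."""
--   # TODO: can be optimized. O(file size) space&time even for a change on only one line
--   added_lines = set(added_lines)
--   removed_lines = set(removed_lines)
--
--   old_line = 1
--   new_line = 1
--
--   new2old = {}
--   old2new = {}
--
--   while old_line <= old_line_count or new_line <= new_line_count:
--     while old_line in removed_lines: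
--       old2new[old_line] = -1
--       old_line += 1
--
--     while new_line in added_lines:
--       new2old[new_line] = -1
--       new_line += 1
--
--     if old_line > old_line_count and new_line > new_line_count:
--       break
--
--     assert (old_line not in removed_lines) and (new_line not in added_lines) \
--         and (old_line <= old_line_count) and (new_line <= new_line_count)
--
--     old2new[old_line] = new_line
--     new2old[new_line] = old_line
--
--     old_line += 1
--     new_line += 1
--
--   assert old_line > old_line_count and new_line > new_line_count
--
--   return new2old, old2new
-- ===== SOURCE B (Python) =====
-- def get_line_mappings(added_lines, removed_lines, old_line_count, new_line_count):
--   """Returns new2old and old2new mappings.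
--
--   Value of -1 means there is no mapping on the other end, e.g., line is removed or added."""
--   added = set(added_lines)
--   removed = set(removed_lines)
--   old_kept = [l for l in range(1, old_line_count + 1) if l not in removed]
--   new_kept = [l for l in range(1, new_line_count + 1) if l not in added]
--   assert len(old_kept) == len(new_kept)
--   pair = dict(zip(old_kept, new_kept))
--   inv = dict(zip(new_kept, old_kept))
--   old2new = {l: pair.get(l, -1) for l in range(1, old_line_count + 1)}
--   new2old = {l: inv.get(l, -1) for l in range(1, new_line_count + 1)}
--   return new2old, old2new
-- ===== Notes on version B (the rewrite author's own statement) =====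
-- stated objective: simpler
-- what changed: Replaces the dual-pointer while-loop state machine with a declarative construction: filter the kept line numbers of each file version, zip them into two lookup dicts, and build old2new/new2old as dict comprehensions over the line ranges (same assert on inconsistent diffs).
-- intended difference: On consistent diffs whose removed_lines/added_lines contain a contiguous run of line numbers starting right past old_line_count/new_line_count (and whose trailing in-range lines are removed/added so the loop body runs again), A's skip loops run past the end of the file and it returns extra -1 mappings for line numbers that do not exist in any version (e.g. old2new[old_line_count+1] = -1); B omits those entries, which is intended because such line numbers are outside both files. — e.g. on get_line_mappings([], [1, 2], 1, 0): A returns ([], [(1, -1), (2, -1)]), B returns ([], [(1, -1)])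
import Mathlib
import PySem

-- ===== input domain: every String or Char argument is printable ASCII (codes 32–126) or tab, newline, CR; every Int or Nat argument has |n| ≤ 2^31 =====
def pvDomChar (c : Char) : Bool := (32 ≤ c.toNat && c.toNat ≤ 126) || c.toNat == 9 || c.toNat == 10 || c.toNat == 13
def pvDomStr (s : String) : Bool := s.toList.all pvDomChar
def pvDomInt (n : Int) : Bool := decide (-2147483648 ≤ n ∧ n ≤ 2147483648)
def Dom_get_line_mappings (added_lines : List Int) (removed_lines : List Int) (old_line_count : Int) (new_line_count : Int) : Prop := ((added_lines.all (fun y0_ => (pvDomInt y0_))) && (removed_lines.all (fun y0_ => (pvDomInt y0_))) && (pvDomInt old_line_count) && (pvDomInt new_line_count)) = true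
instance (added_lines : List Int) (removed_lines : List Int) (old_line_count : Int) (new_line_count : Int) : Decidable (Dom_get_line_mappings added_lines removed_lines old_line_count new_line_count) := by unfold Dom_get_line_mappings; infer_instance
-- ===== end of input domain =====

-- B replaces A's dual-pointer while-loop state machine by filtering the kept line numbers of each
-- version, zipping them into two lookup dicts, and building both maps by comprehension (objective:
-- simpler; no argument is mutated).  On D_ inputs A additionally returns -1 mappings for line
-- numbers beyond the files' line counts; B intentionally omits those nonexistent lines.

-- ===== PORT A =====
-- `while old_line in removed_lines: old2new[old_line] = -1; old_line += 1`
-- (fuel only guards totality: `s.length + 1` steps always suffice, see pvSkip_spec below)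
def pvSkip : Nat → List Int → PySem.Dict Int Int → Int → PySem.Dict Int Int × Int
  | 0, _, d, l => (d, l)
  | fuel + 1, s, d, l => if l ∈ s then pvSkip fuel s (d.insert l (-1)) (l + 1) else (d, l)

-- the outer `while old_line <= old_line_count or new_line <= new_line_count` loop of A
-- (fuel only guards totality: the loop runs at most (oc + 1 - ol) + (nc + 1 - nl) times)
def pvLoop : Nat → List Int → List Int → Int → Int → Int → Int →
    PySem.Dict Int Int → PySem.Dict Int Int → PySem.Dict Int Int × PySem.Dict Int Int
  | 0, _, _, _, _, _, _, n2o, o2n => (n2o, o2n)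
  | fuel + 1, added, removed, oc, nc, ol, nl, n2o, o2n =>
    if ol ≤ oc ∨ nl ≤ nc then
      if (pvSkip (removed.length + 1) removed o2n ol).2 > oc ∧
          (pvSkip (added.length + 1) added n2o nl).2 > nc then
        ((pvSkip (added.length + 1) added n2o nl).1, (pvSkip (removed.length + 1) removed o2n ol).1)
      else if (pvSkip (removed.length + 1) removed o2n ol).2 ∉ removed ∧
          (pvSkip (added.length + 1) added n2o nl).2 ∉ added ∧
          (pvSkip (removed.length + 1) removed o2n ol).2 ≤ oc ∧
          (pvSkip (added.length + 1) added n2o nl).2 ≤ nc then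
        pvLoop fuel added removed oc nc
          ((pvSkip (removed.length + 1) removed o2n ol).2 + 1)
          ((pvSkip (added.length + 1) added n2o nl).2 + 1)
          ((pvSkip (added.length + 1) added n2o nl).1.insert
            (pvSkip (added.length + 1) added n2o nl).2 (pvSkip (removed.length + 1) removed o2n ol).2)
          ((pvSkip (removed.length + 1) removed o2n ol).1.insert
            (pvSkip (removed.length + 1) removed o2n ol).2 (pvSkip (added.length + 1) added n2o nl).2)
      else -- Python: AssertionError (these inputs are excluded by Pre_)
        ((pvSkip (added.length + 1) added n2o nl).1, (pvSkip (removed.length + 1) removed o2n ol).1)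
    else (n2o, o2n)

def get_line_mappings (added_lines : List Int) (removed_lines : List Int) (old_line_count : Int) (new_line_count : Int) : (List (Int × Int)) × (List (Int × Int)) :=
  ((pvLoop (old_line_count.toNat + new_line_count.toNat + 1) added_lines removed_lines
      old_line_count new_line_count 1 1 PySem.Dict.empty PySem.Dict.empty).1.items,
   (pvLoop (old_line_count.toNat + new_line_count.toNat + 1) added_lines removed_lines
      old_line_count new_line_count 1 1 PySem.Dict.empty PySem.Dict.empty).2.items)

-- ===== PORT B =====
def get_line_mappings_alt (added_lines : List Int) (removed_lines : List Int) (old_line_count : Int) (new_line_count : Int) : (List (Int × Int)) × (List (Int × Int)) :=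
  let added : PySem.Set Int := PySem.Set.ofList added_lines
  let removed : PySem.Set Int := PySem.Set.ofList removed_lines
  let old_kept := (PySem.List.pyRange 1 (old_line_count + 1)).filter (fun l => decide (l ∉ removed))
  let new_kept := (PySem.List.pyRange 1 (new_line_count + 1)).filter (fun l => decide (l ∉ added))
  -- assert len(old_kept) == len(new_kept): raises exactly outside Pre_, no effect on the value
  let pair := PySem.Dict.ofList (old_kept.zip new_kept)
  let inv := PySem.Dict.ofList (new_kept.zip old_kept)
  let old2new := (PySem.List.pyRange 1 (old_line_count + 1)).foldl
    (fun d l => d.insert l (pair.getD l (-1))) PySem.Dict.empty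
  let new2old := (PySem.List.pyRange 1 (new_line_count + 1)).foldl
    (fun d l => d.insert l (inv.getD l (-1))) PySem.Dict.empty
  (new2old.items, old2new.items)

-- ===== PRECONDITION & SPEC =====
-- Pre_ excludes exactly the inputs on which A (and B alike) raises AssertionError: those on which
-- the two versions' kept-line counts (lines in range not removed resp. not added) disagree — an
-- inconsistent diff.
def Pre_get_line_mappings (added_lines : List Int) (removed_lines : List Int) (old_line_count : Int) (new_line_count : Int) : Prop :=
  max old_line_count 0 -
      (removed_lines.dedup.countP (fun l => decide (1 ≤ l ∧ l ≤ old_line_count)) : Int)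
    = max new_line_count 0 -
      (added_lines.dedup.countP (fun l => decide (1 ≤ l ∧ l ≤ new_line_count)) : Int)
instance (added_lines : List Int) (removed_lines : List Int) (old_line_count : Int) (new_line_count : Int) : Decidable (Pre_get_line_mappings added_lines removed_lines old_line_count new_line_count) := by unfold Pre_get_line_mappings; infer_instance

def pvWitness_get_line_mappings : List Int × List Int × Int × Int := ([2], [1], 2, 2)

-- On consistent diffs whose removed_lines/added_lines contain a contiguous run of line numbers
-- starting right past old_line_count/new_line_count (and whose last in-range line is removed/added,
-- so A's loop body runs once more), A's skip loops run past the end of the file and it returns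
-- extra -1 mappings for line numbers that exist in no version (e.g. old2new[old_line_count+1] = -1);
-- B omits those entries, which is intended because such line numbers are outside both files.
def D_get_line_mappings (added_lines : List Int) (removed_lines : List Int) (old_line_count : Int) (new_line_count : Int) : Prop :=
  ((1 ≤ old_line_count ∧ old_line_count ∈ removed_lines) ∨
   (1 ≤ new_line_count ∧ new_line_count ∈ added_lines)) ∧
  ((max old_line_count 0 + 1) ∈ removed_lines ∨ (max new_line_count 0 + 1) ∈ added_lines)
instance (added_lines : List Int) (removed_lines : List Int) (old_line_count : Int) (new_line_count : Int) : Decidable (D_get_line_mappings added_lines removed_lines old_line_count new_line_count) := by unfold D_get_line_mappings; infer_instance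

def Spec_get_line_mappings (added_lines : List Int) (removed_lines : List Int) (old_line_count : Int) (new_line_count : Int) (out : (List (Int × Int)) × (List (Int × Int))) : Prop := ¬ D_get_line_mappings added_lines removed_lines old_line_count new_line_count → out = get_line_mappings_alt added_lines removed_lines old_line_count new_line_count
instance (added_lines : List Int) (removed_lines : List Int) (old_line_count : Int) (new_line_count : Int) (out : (List (Int × Int)) × (List (Int × Int))) : Decidable (Spec_get_line_mappings added_lines removed_lines old_line_count new_line_count out) := by unfold Spec_get_line_mappings; infer_instance

def pvDiffWitness_get_line_mappings : List Int × List Int × Int × Int := ([], [1, 2], 1, 0)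
def pvDiffWitnessOut_get_line_mappings : ((List (Int × Int)) × (List (Int × Int))) × ((List (Int × Int)) × (List (Int × Int))) :=
  (([], [(1, -1), (2, -1)]), ([], [(1, -1)]))

-- ===== CLAIM (what is proved, stated in full; the proofs are below) =====
def Claim_unchanged_get_line_mappings : Prop := ∀ (added_lines : List Int) (removed_lines : List Int) (old_line_count : Int) (new_line_count : Int), Dom_get_line_mappings added_lines removed_lines old_line_count new_line_count → Pre_get_line_mappings added_lines removed_lines old_line_count new_line_count → Spec_get_line_mappings added_lines removed_lines old_line_count new_line_count (get_line_mappings added_lines removed_lines old_line_count new_line_count)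
def Claim_changed_get_line_mappings : Prop := Dom_get_line_mappings (pvDiffWitness_get_line_mappings.1) (pvDiffWitness_get_line_mappings.2.1) (pvDiffWitness_get_line_mappings.2.2.1) (pvDiffWitness_get_line_mappings.2.2.2) ∧ Pre_get_line_mappings (pvDiffWitness_get_line_mappings.1) (pvDiffWitness_get_line_mappings.2.1) (pvDiffWitness_get_line_mappings.2.2.1) (pvDiffWitness_get_line_mappings.2.2.2) ∧ D_get_line_mappings (pvDiffWitness_get_line_mappings.1) (pvDiffWitness_get_line_mappings.2.1) (pvDiffWitness_get_line_mappings.2.2.1) (pvDiffWitness_get_line_mappings.2.2.2) ∧ get_line_mappings (pvDiffWitness_get_line_mappings.1) (pvDiffWitness_get_line_mappings.2.1) (pvDiffWitness_get_line_mappings.2.2.1) (pvDiffWitness_get_line_mappings.2.2.2) = pvDiffWitnessOut_get_line_mappings.1 ∧ get_line_mappings_alt (pvDiffWitness_get_line_mappings.1) (pvDiffWitness_get_line_mappings.2.1) (pvDiffWitness_get_line_mappings.2.2.1) (pvDiffWitness_get_line_mappings.2.2.2) = pvDiffWitnessOut_get_line_mappings.2 ∧ pvDiffWitnessOut_get_line_mappings.1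 ≠ pvDiffWitnessOut_get_line_mappings.2

-- ===== LEMMAS AND PROOFS =====

-- the inner skip loops make at most (number of members ≥ pointer) steps, so `s.length + 1` fuel
-- always suffices
theorem pvFilterGE_lt (s : List Int) (l : Int) (h : l ∈ s) :
    (s.filter (fun x => decide (l + 1 ≤ x))).length < (s.filter (fun x => decide (l ≤ x))).length := by
  induction s with
  | nil => cases h
  | cons a t ih =>
    have hle : (t.filter (fun x => decide (l + 1 ≤ x))).length ≤ (t.filter (fun x => decide (l ≤ x))).length := by
      apply List.Sublist.length_le
      apply List.monotone_filter_right
      intro x hx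
      simp at hx ⊢; omega
    simp only [List.filter_cons]
    rcases List.mem_cons.mp h with rfl | ha
    · rw [if_neg (by simp), if_pos (by simp)]
      simp only [List.length_cons]
      omega
    · have hi := ih ha
      by_cases h1 : l + 1 ≤ a
      · rw [if_pos (by simpa using h1), if_pos (by simp; omega)]
        simpa using hi
      · rw [if_neg (by simpa using h1)]
        by_cases h2 : l ≤ a
        · rw [if_pos (by simpa using h2)]
          simp only [List.length_cons]
          omega
        · rw [if_neg (by simpa using h2)]
          exact hi


-- kept line numbers of a version: those in [a, b) that are not removed (resp. added)
def pvKept (s : List Int) (a b : Int) : List Int :=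
  (PySem.List.pyRange a b).filter (fun l => decide (l ∉ s))

-- first integer ≥ l that is not a member of s (where A's inner skip loops stop)
def pvFree (s : List Int) (l : Int) : Int :=
  if h : l ∈ s then pvFree s (l + 1) else l
termination_by (s.filter (fun x => decide (l ≤ x))).length
decreasing_by exact pvFilterGE_lt s l h

theorem le_pvFree (s : List Int) (l : Int) : l ≤ pvFree s l := by
  refine pvFree.induct s (fun l => l ≤ pvFree s l) ?_ ?_ l
  · intro l h ih
    rw [pvFree, dif_pos h]
    omega
  · intro l h
    rw [pvFree, dif_neg h]

theorem pvFree_not_mem (s : List Int) (l : Int) : pvFree s l ∉ s := by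
  refine pvFree.induct s (fun l => pvFree s l ∉ s) ?_ ?_ l
  · intro l h ih
    rw [pvFree, dif_pos h]
    exact ih
  · intro l h
    rw [pvFree, dif_neg h]
    exact h

theorem pvFree_min (s : List Int) (l : Int) : ∀ x, l ≤ x → x ∉ s → pvFree s l ≤ x := by
  refine pvFree.induct s (fun l => ∀ x, l ≤ x → x ∉ s → pvFree s l ≤ x) ?_ ?_ l
  · intro l h ih x hx hxs
    rw [pvFree, dif_pos h]
    have : l ≠ x := by rintro rfl; exact hxs h
    exact ih x (by omega) hxs
  · intro l h x hx _
    rw [pvFree, dif_neg h]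
    exact hx

theorem pvContains_of_lt (d : PySem.Dict Int Int) (l : Int) (h : ∀ p ∈ d.items, p.1 < l) :
    d.contains l = false := by
  by_contra hc
  rw [Bool.not_eq_false, PySem.Dict.contains_iff_mem_keys] at hc
  simp only [PySem.Dict.keys, List.mem_map] at hc
  obtain ⟨p, hp, hpe⟩ := hc
  have := h p hp
  omega

theorem pvSkip_spec (s : List Int) : ∀ (fuel : Nat) (d : PySem.Dict Int Int) (l : Int),
    (s.filter (fun x => decide (l ≤ x))).length < fuel →
    (∀ p ∈ d.items, p.1 < l) →
    (pvSkip fuel s d l).1.items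
        = d.items ++ (PySem.List.pyRange l (pvFree s l)).map (fun i => (i, (-1 : Int))) ∧
      (pvSkip fuel s d l).2 = pvFree s l := by
  intro fuel
  induction fuel with
  | zero => intro d l hf; omega
  | succ fuel ih =>
    intro d l hf hlt
    by_cases h : l ∈ s
    · have hc : d.contains l = false := pvContains_of_lt d l hlt
      have hins := PySem.Dict.items_insert_of_not_contains d (-1 : Int) hc
      have hlt' : ∀ p ∈ (d.insert l (-1)).items, p.1 < l + 1 := by
        intro p hp
        rw [hins] at hp
        rcases List.mem_append.mp hp with h1 | h1
        · have := hlt p h1; omega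
        · simp at h1; subst h1; show l < l + 1; omega
      have hf' : (s.filter (fun x => decide (l + 1 ≤ x))).length < fuel := by
        have := pvFilterGE_lt s l h
        omega
      obtain ⟨i1, i2⟩ := ih (d.insert l (-1)) (l + 1) hf' hlt'
      have hfree : pvFree s l = pvFree s (l + 1) := by rw [pvFree, dif_pos h]
      have hlt2 : l < pvFree s l := by
        have := le_pvFree s (l + 1)
        omega
      rw [pvSkip, if_pos h]
      refine ⟨?_, by rw [i2, hfree]⟩
      rw [i1, hins, PySem.List.pyRange_one_cons hlt2, ← hfree, List.map_cons, List.append_assoc]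
      rfl
    · rw [pvSkip, if_neg h]
      have hfree : pvFree s l = l := by rw [pvFree, dif_neg h]
      rw [hfree, PySem.List.pyRange_one_eq_nil (le_refl l)]
      simp

theorem pvKept_len (s : List Int) (c : Int) :
    ((pvKept s 1 (c + 1)).length : Int)
      = max c 0 - (s.dedup.countP (fun l => decide (1 ≤ l ∧ l ≤ c)) : Int) := by
  have h1 : (pvKept s 1 (c + 1)).length
      + ((PySem.List.pyRange 1 (c + 1)).filter (fun l => decide (l ∈ s))).length
      = (PySem.List.pyRange 1 (c + 1)).length := by
    unfold pvKept
    rw [← List.length_append]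
    apply List.Perm.length_eq
    have hq : (List.filter (fun l => decide (l ∈ s)) (PySem.List.pyRange 1 (c + 1)))
        = (List.filter (fun x => !decide (x ∉ s)) (PySem.List.pyRange 1 (c + 1))) := by
      apply List.filter_congr
      intro x _
      simp
    rw [hq]
    exact List.filter_append_perm _ _
  have h2 : ((PySem.List.pyRange 1 (c + 1)).filter (fun l => decide (l ∈ s))).length
      = s.dedup.countP (fun l => decide (1 ≤ l ∧ l ≤ c)) := by
    rw [List.countP_eq_length_filter]
    apply List.Perm.length_eq
    apply (List.perm_ext_iff_of_nodup
      (List.Nodup.filter _ (PySem.List.nodup_pyRange_one 1 (c + 1)))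
      (List.Nodup.filter _ s.nodup_dedup)).mpr
    intro a
    simp only [List.mem_filter, PySem.List.mem_pyRange_one, List.mem_dedup, decide_eq_true_eq]
    constructor
    · rintro ⟨⟨ha1, ha2⟩, ha3⟩
      exact ⟨ha3, ha1, by omega⟩
    · rintro ⟨ha3, ha1, ha2⟩
      exact ⟨⟨ha1, by omega⟩, ha3⟩
  have h3 : ((PySem.List.pyRange 1 (c + 1)).length : Int) = max c 0 := by
    rw [PySem.List.length_pyRange_one]
    omega
  omega

theorem pvKept_nil (s : List Int) {a b : Int} (h : b ≤ a) : pvKept s a b = [] := by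
  unfold pvKept
  rw [PySem.List.pyRange_one_eq_nil h]
  rfl

theorem pvKept_step (s : List Int) {a b : Int} (h : a < b) :
    pvKept s a b = if a ∈ s then pvKept s (a + 1) b else a :: pvKept s (a + 1) b := by
  unfold pvKept
  rw [PySem.List.pyRange_one_cons h, List.filter_cons]
  by_cases hm : a ∈ s <;> simp [hm]

theorem mem_pvKept {s : List Int} {a b i : Int} : i ∈ pvKept s a b ↔ a ≤ i ∧ i < b ∧ i ∉ s := by
  unfold pvKept
  simp [PySem.List.mem_pyRange_one]
  tauto

theorem pvKept_nil_mem {s : List Int} {a b : Int} (h : pvKept s a b = []) :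
    ∀ i, a ≤ i → i < b → i ∈ s := by
  intro i h1 h2
  by_contra hm
  have : i ∈ pvKept s a b := mem_pvKept.mpr ⟨h1, h2, hm⟩
  rw [h] at this
  cases this

theorem pvKept_nodup (s : List Int) (a b : Int) : (pvKept s a b).Nodup :=
  List.Nodup.filter _ (PySem.List.nodup_pyRange_one a b)

theorem pvKept_head (s : List Int) : ∀ (μ : Nat) (a b x : Int) (xs : List Int),
    μ = (b - a).toNat → pvKept s a b = x :: xs →
    a ≤ x ∧ x < b ∧ x ∉ s ∧ (∀ i, a ≤ i → i < x → i ∈ s) ∧ pvKept s (x + 1) b = xs := by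
  intro μ
  induction μ using Nat.strong_induction_on with
  | _ μ ih =>
    intro a b x xs hμ hk
    rcases lt_or_ge a b with hab | hab
    · rw [pvKept_step s hab] at hk
      by_cases hm : a ∈ s
      · rw [if_pos hm] at hk
        obtain ⟨h1, h2, h3, h4, h5⟩ := ih ((b - (a + 1)).toNat) (by omega) (a + 1) b x xs rfl hk
        refine ⟨by omega, h2, h3, ?_, h5⟩
        intro i hi1 hi2
        rcases eq_or_lt_of_le hi1 with rfl | hlt
        · exact hm
        · exact h4 i (by omega) hi2
      · rw [if_neg hm] at hk
        injection hk with hx hxs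
        subst hx; subst hxs
        exact ⟨le_refl a, hab, hm, by intro i h1 h2; omega, rfl⟩
    · rw [pvKept_nil s hab] at hk
      cases hk

theorem pvFree_of_head {s : List Int} {a b x : Int} {xs : List Int}
    (h : pvKept s a b = x :: xs) : pvFree s a = x := by
  obtain ⟨h1, h2, h3, h4, h5⟩ := pvKept_head s (b - a).toNat a b x xs rfl h
  have hle : pvFree s a ≤ x := pvFree_min s a x h1 h3
  have hge : ¬ (pvFree s a < x) := by
    intro hlt
    exact pvFree_not_mem s a (h4 _ (le_pvFree s a) hlt)
  omega

theorem pvFree_of_nil {s : List Int} {a b : Int} (h : pvKept s a b = []) (hb : max a b ∉ s) :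
    pvFree s a = max a b := by
  have h1 : pvFree s a ≤ max a b := pvFree_min s a _ (le_max_left a b) hb
  have h2 : a ≤ pvFree s a := le_pvFree s a
  have h3 : ¬ (pvFree s a < b) := by
    intro hlt
    exact pvFree_not_mem s a (pvKept_nil_mem h _ h2 hlt)
  omega

theorem pvGetD_not_mem {ks vs : List Int} {l d : Int} (h : l ∉ ks) :
    (PySem.Dict.mk (ks.zip vs)).getD l d = d := by
  simp only [PySem.Dict.getD, PySem.Dict.get?]
  rw [List.find?_eq_none.mpr]
  · rfl
  · rintro ⟨p1, p2⟩ hp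
    have := (List.of_mem_zip hp).1
    simp only [beq_iff_eq]
    rintro rfl
    exact h this

theorem pvGetD_head (x y : Int) (rest : List (Int × Int)) (d : Int) :
    (PySem.Dict.mk ((x, y) :: rest)).getD x d = y := by
  simp [PySem.Dict.getD, PySem.Dict.get?]

theorem pvGetD_cons_ne {l x : Int} (h : l ≠ x) (y : Int) (rest : List (Int × Int)) (d : Int) :
    (PySem.Dict.mk ((x, y) :: rest)).getD l d = (PySem.Dict.mk rest).getD l d := by
  simp only [PySem.Dict.getD, PySem.Dict.get?]
  rw [List.find?_cons_of_neg]
  simp [Ne.symm h]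

-- the comprehension side: a fold of inserts over fresh increasing keys is a plain map
theorem pvFold_map (a b : Int) (f : Int → Int) :
    ((PySem.List.pyRange a b).foldl (fun d l => d.insert l (f l)) PySem.Dict.empty).items
      = (PySem.List.pyRange a b).map (fun l => (l, f l)) := by
  rw [PySem.Dict.items_foldl_insert_fresh (PySem.List.pyRange a b) (fun l => l) f PySem.Dict.empty
      (by intro x _; rfl) (by simpa using PySem.List.nodup_pyRange_one a b)]
  rfl

theorem pvMapFstZip (ks vs : List Int) : (ks.zip vs).map Prod.fst = ks.take vs.length := by
  induction ks generalizing vs with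
  | nil => simp
  | cons a t ih =>
    cases vs with
    | nil => simp
    | cons b u => simp [ih]

theorem pvOfList_zip (ks vs : List Int) (h : ks.Nodup) :
    PySem.Dict.ofList (ks.zip vs) = PySem.Dict.mk (ks.zip vs) := by
  apply PySem.Dict.ext
  have hnd : ((ks.zip vs).map (fun p => p.1)).Nodup := by
    rw [show (fun p : Int × Int => p.1) = Prod.fst from rfl, pvMapFstZip]
    exact h.sublist (List.take_sublist _ _)
  have := PySem.Dict.items_foldl_insert_fresh (ks.zip vs) (fun p => p.1) (fun p => p.2)
      PySem.Dict.empty (by intro x _; rfl) hnd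
  show (List.foldl (fun acc p => acc.insert p.1 p.2) PySem.Dict.empty (ks.zip vs)).items = _
  rw [this]
  simp [PySem.Dict.empty]

-- what both programs append for the line-number interval [a, b)
def pvMapOut (a b : Int) (pd : PySem.Dict Int Int) : List (Int × Int) :=
  (PySem.List.pyRange a b).map (fun l => (l, pd.getD l (-1)))

theorem pvMapOut_split {s : List Int} {a b x : Int} {xs : List Int} (y : Int) (ys : List Int)
    (hk : pvKept s a b = x :: xs) :
    pvMapOut a b (PySem.Dict.mk ((x :: xs).zip (y :: ys))) =
      ((PySem.List.pyRange a x).map (fun i => (i, (-1 : Int)))) ++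
        (x, y) :: pvMapOut (x + 1) b (PySem.Dict.mk (xs.zip ys)) := by
  obtain ⟨e1, e2, e3, e4, e5⟩ := pvKept_head s (b - a).toNat a b x xs rfl hk
  unfold pvMapOut
  rw [PySem.List.pyRange_one_append a x b e1 (by omega), List.map_append,
    PySem.List.pyRange_one_cons (show x < b by omega), List.map_cons]
  congr 1
  · apply List.map_congr_left
    intro i hi
    rw [PySem.List.mem_pyRange_one] at hi
    have hiS : i ∈ s := e4 i hi.1 hi.2
    have hnm : i ∉ (x :: xs) := by
      intro hmem
      have : i ∈ pvKept s a b := by rw [hk]; exact hmem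
      exact (mem_pvKept.mp this).2.2 hiS
    rw [pvGetD_not_mem hnm]
  · congr 1
    · rw [List.zip_cons_cons, pvGetD_head]
    · apply List.map_congr_left
      intro i hi
      rw [PySem.List.mem_pyRange_one] at hi
      rw [List.zip_cons_cons, pvGetD_cons_ne (show i ≠ x by omega)]

theorem pvMain (added removed : List Int) (oc nc : Int)
    (hD' : ((max oc 0 + 1) ∉ removed ∧ (max nc 0 + 1) ∉ added) ∨
           (¬(1 ≤ oc ∧ oc ∈ removed) ∧ ¬(1 ≤ nc ∧ nc ∈ added))) :
    ∀ (μ : Nat) (fuel : Nat) (ol nl : Int) (n2o o2n : PySem.Dict Int Int),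
    μ = ((oc + 1 - ol).toNat + (nc + 1 - nl).toNat) → μ < fuel →
    1 ≤ ol → ol ≤ max (oc + 1) 1 → 1 ≤ nl → nl ≤ max (nc + 1) 1 →
    (pvKept removed ol (oc + 1)).length = (pvKept added nl (nc + 1)).length →
    (∀ p ∈ o2n.items, p.1 < ol) → (∀ p ∈ n2o.items, p.1 < nl) →
    pvLoop fuel added removed oc nc ol nl n2o o2n =
      (PySem.Dict.mk (n2o.items ++ pvMapOut nl (nc + 1)
          (PySem.Dict.mk ((pvKept added nl (nc + 1)).zip (pvKept removed ol (oc + 1))))),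
       PySem.Dict.mk (o2n.items ++ pvMapOut ol (oc + 1)
          (PySem.Dict.mk ((pvKept removed ol (oc + 1)).zip (pvKept added nl (nc + 1)))))) := by
  intro μ
  induction μ using Nat.strong_induction_on with
  | _ μ ihμ =>
  intro fuel ol nl n2o o2n hμ hfuel h1o h2o h1n h2n hsync hko hkn
  obtain ⟨fuel, rfl⟩ : ∃ f, fuel = f + 1 := ⟨fuel - 1, by omega⟩
  by_cases hcond : ol ≤ oc ∨ nl ≤ nc
  · obtain ⟨sO, fO⟩ := pvSkip_spec removed (removed.length + 1) o2n ol
      (by have := List.length_filter_le (fun x => decide (ol ≤ x)) removed; omega) hko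
    obtain ⟨sN, fN⟩ := pvSkip_spec added (added.length + 1) n2o nl
      (by have := List.length_filter_le (fun x => decide (nl ≤ x)) added; omega) hkn
    rw [pvLoop, if_pos hcond]
    rcases hk : pvKept removed ol (oc + 1) with _ | ⟨x, xs⟩
    · -- no kept old line remains; by the count invariant no kept new line remains either:
      -- A's loop body runs one final time, both skip loops stop exactly at the boundary
      have hkn' : pvKept added nl (nc + 1) = [] := by
        rw [hk] at hsync
        exact List.length_eq_zero_iff.mp hsync.symm
      have hmo : max ol (oc + 1) ∉ removed ∧ max nl (nc + 1) ∉ added := by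
        rcases hD' with ⟨ha, hb⟩ | ⟨ha, hb⟩
        · constructor
          · have : max ol (oc + 1) = max oc 0 + 1 := by omega
            rw [this]; exact ha
          · have : max nl (nc + 1) = max nc 0 + 1 := by omega
            rw [this]; exact hb
        · exfalso
          rcases hcond with hc | hc
          · exact ha ⟨by omega, pvKept_nil_mem hk oc (by omega) (by omega)⟩
          · exact hb ⟨by omega, pvKept_nil_mem hkn' nc (by omega) (by omega)⟩
      have fO' : pvFree removed ol = max ol (oc + 1) := pvFree_of_nil hk hmo.1
      have fN' : pvFree added nl = max nl (nc + 1) := pvFree_of_nil hkn' hmo.2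
      rw [if_pos (by rw [fO, fN, fO', fN']; omega)]
      refine Prod.ext ?_ ?_
      · apply PySem.Dict.ext
        rw [sN, fN']
        congr 1
        rw [hkn']
        unfold pvMapOut
        have hr : PySem.List.pyRange nl (max nl (nc + 1)) = PySem.List.pyRange nl (nc + 1) := by
          rcases le_or_gt nl (nc + 1) with hle | hgt
          · congr 1; omega
          · rw [PySem.List.pyRange_one_eq_nil (by omega), PySem.List.pyRange_one_eq_nil (by omega)]
        rw [hr]
        apply List.map_congr_left
        intro i _
        rw [pvGetD_not_mem (List.not_mem_nil)]
      · apply PySem.Dict.ext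
        rw [sO, fO']
        congr 1
        unfold pvMapOut
        have hr : PySem.List.pyRange ol (max ol (oc + 1)) = PySem.List.pyRange ol (oc + 1) := by
          rcases le_or_gt ol (oc + 1) with hle | hgt
          · congr 1; omega
          · rw [PySem.List.pyRange_one_eq_nil (by omega), PySem.List.pyRange_one_eq_nil (by omega)]
        rw [hr]
        apply List.map_congr_left
        intro i _
        rw [pvGetD_not_mem (List.not_mem_nil)]
    · -- a kept old line x remains: by the count invariant a kept new line y remains; A pairs them
      rcases hkn2 : pvKept added nl (nc + 1) with _ | ⟨y, ys⟩
      · rw [hk, hkn2] at hsync; cases hsync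
      obtain ⟨e1, e2, e3, e4, e5⟩ := pvKept_head removed ((oc + 1) - ol).toNat ol (oc + 1) x xs rfl hk
      obtain ⟨g1, g2, g3, g4, g5⟩ := pvKept_head added ((nc + 1) - nl).toNat nl (nc + 1) y ys rfl hkn2
      have fO' : pvFree removed ol = x := pvFree_of_head hk
      have fN' : pvFree added nl = y := pvFree_of_head hkn2
      rw [if_neg (by rw [fO, fO']; intro hcontra; omega)]
      rw [if_pos (by rw [fO, fN, fO', fN']; exact ⟨e3, g3, by omega, by omega⟩)]
      -- items of the dicts entering the recursive call
      have hcO : (pvSkip (removed.length + 1) removed o2n ol).1.contains x = false := by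
        apply pvContains_of_lt
        intro p hp
        rw [sO, fO'] at hp
        rcases List.mem_append.mp hp with h1 | h1
        · have := hko p h1; omega
        · obtain ⟨i, hi, rfl⟩ := List.mem_map.mp h1
          rw [PySem.List.mem_pyRange_one] at hi
          omega
      have hcN : (pvSkip (added.length + 1) added n2o nl).1.contains y = false := by
        apply pvContains_of_lt
        intro p hp
        rw [sN, fN'] at hp
        rcases List.mem_append.mp hp with h1 | h1
        · have := hkn p h1; omega
        · obtain ⟨i, hi, rfl⟩ := List.mem_map.mp h1
          rw [PySem.List.mem_pyRange_one] at hi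
          omega
      have hinsO := PySem.Dict.items_insert_of_not_contains (pvSkip (removed.length + 1) removed o2n ol).1
        ((pvSkip (added.length + 1) added n2o nl).2) hcO
      have hinsN := PySem.Dict.items_insert_of_not_contains (pvSkip (added.length + 1) added n2o nl).1
        ((pvSkip (removed.length + 1) removed o2n ol).2) hcN
      rw [fN, fN'] at hinsO
      rw [fO, fO'] at hinsN
      rw [fO, fN, fO', fN']
      have hko' : ∀ p ∈ ((pvSkip (removed.length + 1) removed o2n ol).1.insert x y).items, p.1 < x + 1 := by
        intro p hp
        rw [hinsO] at hp
        rcases List.mem_append.mp hp with h1 | h1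
        · rw [sO, fO'] at h1
          rcases List.mem_append.mp h1 with h2 | h2
          · have := hko p h2; omega
          · obtain ⟨i, hi, rfl⟩ := List.mem_map.mp h2
            rw [PySem.List.mem_pyRange_one] at hi
            omega
        · simp at h1; subst h1; show x < x + 1; omega
      have hkn' : ∀ p ∈ ((pvSkip (added.length + 1) added n2o nl).1.insert y x).items, p.1 < y + 1 := by
        intro p hp
        rw [hinsN] at hp
        rcases List.mem_append.mp hp with h1 | h1
        · rw [sN, fN'] at h1
          rcases List.mem_append.mp h1 with h2 | h2
          · have := hkn p h2; omega
          · obtain ⟨i, hi, rfl⟩ := List.mem_map.mp h2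
            rw [PySem.List.mem_pyRange_one] at hi
            omega
        · simp at h1; subst h1; show y < y + 1; omega
      rw [ihμ ((oc + 1 - (x + 1)).toNat + (nc + 1 - (y + 1)).toNat) (by omega)
        fuel (x + 1) (y + 1) _ _ rfl (by omega) (by omega) (by omega) (by omega) (by omega)
        (by rw [e5, g5]; rw [hk, hkn2] at hsync; simpa using hsync) hko' hkn']
      refine Prod.ext ?_ ?_
      · apply PySem.Dict.ext
        show (((pvSkip (added.length + 1) added n2o nl).1.insert y x).items ++ _) = _
        rw [hinsN, sN, fN', e5, g5,
          pvMapOut_split x xs hkn2]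
        simp [List.append_assoc]
      · apply PySem.Dict.ext
        show (((pvSkip (removed.length + 1) removed o2n ol).1.insert x y).items ++ _) = _
        rw [hinsO, sO, fO', e5, g5,
          pvMapOut_split y ys hk]
        simp [List.append_assoc]
  · rw [pvLoop, if_neg hcond]

    unfold pvMapOut
    rw [PySem.List.pyRange_one_eq_nil (show (nc : Int) + 1 ≤ nl by omega),
      PySem.List.pyRange_one_eq_nil (show (oc : Int) + 1 ≤ ol by omega)]
    simp

theorem pvAlt_eq (ad rm : List Int) (oc nc : Int) :
    get_line_mappings_alt ad rm oc nc =
      (pvMapOut 1 (nc + 1) (PySem.Dict.mk ((pvKept ad 1 (nc + 1)).zip (pvKept rm 1 (oc + 1)))),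
       pvMapOut 1 (oc + 1) (PySem.Dict.mk ((pvKept rm 1 (oc + 1)).zip (pvKept ad 1 (nc + 1))))) := by
  unfold get_line_mappings_alt
  have hfil1 : (PySem.List.pyRange 1 (oc + 1)).filter (fun l => decide (l ∉ PySem.Set.ofList rm))
      = pvKept rm 1 (oc + 1) := by
    unfold pvKept
    apply List.filter_congr
    intro x _
    simp [PySem.Set.mem_ofList]
  have hfil2 : (PySem.List.pyRange 1 (nc + 1)).filter (fun l => decide (l ∉ PySem.Set.ofList ad))
      = pvKept ad 1 (nc + 1) := by
    unfold pvKept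
    apply List.filter_congr
    intro x _
    simp [PySem.Set.mem_ofList]
  simp only [hfil1, hfil2]
  rw [pvOfList_zip _ _ (pvKept_nodup rm 1 (oc + 1)), pvOfList_zip _ _ (pvKept_nodup ad 1 (nc + 1))]
  refine Prod.ext ?_ ?_
  · show ((PySem.List.pyRange 1 (nc + 1)).foldl _ PySem.Dict.empty).items = _
    rw [pvFold_map]
    rfl
  · show ((PySem.List.pyRange 1 (oc + 1)).foldl _ PySem.Dict.empty).items = _
    rw [pvFold_map]
    rfl

-- ===== VERDICT (by name: the statement is the Claim_ definition above) =====
theorem get_line_mappings_spec : Claim_unchanged_get_line_mappings := by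
  unfold Claim_unchanged_get_line_mappings
  intro ad rm oc nc _hdom hpre
  unfold Spec_get_line_mappings
  intro hnd
  have hD' : ((max oc 0 + 1) ∉ rm ∧ (max nc 0 + 1) ∉ ad) ∨
      (¬(1 ≤ oc ∧ oc ∈ rm) ∧ ¬(1 ≤ nc ∧ nc ∈ ad)) := by
    unfold D_get_line_mappings at hnd
    tauto
  have hsync : (pvKept rm 1 (oc + 1)).length = (pvKept ad 1 (nc + 1)).length := by
    unfold Pre_get_line_mappings at hpre
    have e1 := pvKept_len rm oc
    have e2 := pvKept_len ad nc
    omega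
  have key := pvMain ad rm oc nc hD' ((oc + 1 - 1).toNat + (nc + 1 - 1).toNat)
    (oc.toNat + nc.toNat + 1) 1 1
    PySem.Dict.empty PySem.Dict.empty rfl (by omega) (le_refl 1) (by omega) (le_refl 1) (by omega)
    hsync (by intro p hp; cases hp) (by intro p hp; cases hp)
  unfold get_line_mappings
  rw [key, pvAlt_eq]
  rfl

theorem get_line_mappings_changed : Claim_changed_get_line_mappings := by
  unfold Claim_changed_get_line_mappings
  decide
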